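-- pv_equiv track=rewrite | github.com/bilginyuksel/AlgorithmSolutions | hackerrank/minimum-time-required.py | findMinimumTimePassed
-- ===== SOURCE A (Python) =====
-- def getProductCountByTimePassed(machines, timePassed):
--     productCount = 0
--     for dayToProduce in machines:
--         productCount += timePassed // dayToProduce
--     return productCount
--
-- def findMinimumTimePassed(machines, minTime, maxTime, goal):
--     while minTime < maxTime:
--         time = (minTime + maxTime) // 2
--         productCount = getProductCountByTimePassed(machines, time)
--         if productCount < goal:
--             minTime = time + 1
--         else:
--             maxTime = time
--
--     return maxTime
-- ===== SOURCE B (Python) =====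
-- def findMinimumTimePassed(machines, minTime, maxTime, goal):
--     if maxTime <= minTime:
--         return maxTime
--     step = 1
--     while step * 2 <= maxTime - minTime:
--         step *= 2
--     time = minTime
--     while step > 0:
--         if time + step <= maxTime and sum((time + step - 1) // dayToProduce for dayToProduce in machines) < goal:
--             time += step
--         step //= 2
--     return time
-- ===== Notes on version B (the rewrite author's own statement) =====
-- stated objective: alternative
-- what changed: Replaces the midpoint bisection of [minTime, maxTime] by binary lifting: a power-of-two step is precomputed by doubling and the answer is built additively from minTime, halving the step and testing the inline-summed product count at the end of each candidate block.
-- outside the precondition, e.g. on findMinimumTimePassed([-1, -3], -4, 5, 0): A returns -4, B returns 5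
import Mathlib
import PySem

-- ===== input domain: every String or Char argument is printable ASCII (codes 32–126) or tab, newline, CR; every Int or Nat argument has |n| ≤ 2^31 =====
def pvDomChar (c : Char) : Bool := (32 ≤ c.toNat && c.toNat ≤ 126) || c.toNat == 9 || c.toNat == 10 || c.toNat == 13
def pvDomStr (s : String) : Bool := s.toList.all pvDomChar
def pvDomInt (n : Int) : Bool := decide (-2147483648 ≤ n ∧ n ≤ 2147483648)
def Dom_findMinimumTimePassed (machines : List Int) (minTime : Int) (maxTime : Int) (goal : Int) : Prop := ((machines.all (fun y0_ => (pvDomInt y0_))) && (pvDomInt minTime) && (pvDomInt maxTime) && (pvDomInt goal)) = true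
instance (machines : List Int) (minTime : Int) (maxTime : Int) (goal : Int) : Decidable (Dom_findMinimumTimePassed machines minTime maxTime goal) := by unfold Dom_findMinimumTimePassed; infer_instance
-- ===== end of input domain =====

-- B replaces A's midpoint bisection by binary lifting: a precomputed power-of-two step
-- descends while the answer is built additively from minTime (objective: alternative).

-- ===== PORT A =====
def getProductCountByTimePassed (machines : List Int) (timePassed : Int) : Int :=
  machines.foldl (fun productCount dayToProduce => productCount + PySem.Int.floordiv timePassed dayToProduce) 0

def bsearchLoop (machines : List Int) (goal : Int) (minTime : Int) (maxTime : Int) : Int :=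
  if h : minTime < maxTime then
    let time := PySem.Int.floordiv (minTime + maxTime) 2
    if getProductCountByTimePassed machines time < goal then
      bsearchLoop machines goal (time + 1) maxTime
    else
      bsearchLoop machines goal minTime time
  else maxTime
termination_by (maxTime - minTime).toNat
decreasing_by
  · have h1 := PySem.Int.floordiv_two_mid_bounds (le_of_lt h) (lo := minTime) (hi := maxTime)
    omega
  · have h1 := PySem.Int.floordiv_two_mid_bounds (le_of_lt h) (lo := minTime) (hi := maxTime)
    have h2 : PySem.Int.floordiv (minTime + maxTime) 2 < maxTime :=
      (PySem.Int.floordiv_lt_iff_lt_mul (by norm_num)).mpr (by omega)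
    omega

def findMinimumTimePassed (machines : List Int) (minTime : Int) (maxTime : Int) (goal : Int) : Int :=
  bsearchLoop machines goal minTime maxTime

-- ===== PORT B =====
def prodCount (machines : List Int) (time : Int) : Int :=
  (machines.map (fun dayToProduce => PySem.Int.floordiv time dayToProduce)).sum

-- 'while step * 2 <= maxTime - minTime: step *= 2'; the 0 < step guard only makes the
-- recursion total (it always holds on B's single call with step = 1)
def initStep (span : Int) (step : Int) : Int :=
  if h : 0 < step ∧ step * 2 ≤ span then initStep span (step * 2) else step
termination_by (span - step).toNat
decreasing_by omega

-- 'while step > 0: if time + step <= maxTime and sum(...) < goal: time += step; step //= 2'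
def bitLoop (machines : List Int) (goal : Int) (maxTime : Int) (time : Int) (step : Int) : Int :=
  if h : 0 < step then
    bitLoop machines goal maxTime
      (if time + step ≤ maxTime ∧ prodCount machines (time + step - 1) < goal then time + step else time)
      (PySem.Int.floordiv step 2)
  else time
termination_by step.toNat
decreasing_by
  rw [PySem.Int.floordiv_eq_ediv_of_pos (by norm_num)]
  omega

def findMinimumTimePassed_alt (machines : List Int) (minTime : Int) (maxTime : Int) (goal : Int) : Int :=
  if maxTime ≤ minTime then maxTime
  else bitLoop machines goal maxTime minTime (initStep (maxTime - minTime) 1)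

-- ===== PRECONDITION & SPEC =====
-- Pre_ excludes inputs on which the loop body runs with a non-positive machine time: a zero
-- machine makes A raise ZeroDivisionError, and a negative machine makes the product count
-- non-monotone in time, so the binary search's returned midpoint is an accident of bisection
-- order rather than the minimal qualifying time; production times are naturally positive.
def Pre_findMinimumTimePassed (machines : List Int) (minTime : Int) (maxTime : Int) (goal : Int) : Prop :=
  maxTime ≤ minTime ∨ ∀ m ∈ machines, 0 < m
instance (machines : List Int) (minTime : Int) (maxTime : Int) (goal : Int) : Decidable (Pre_findMinimumTimePassed machines minTime maxTime goal) := by unfold Pre_findMinimumTimePassed; infer_instance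

def pvWitness_findMinimumTimePassed : List Int × Int × Int × Int := ([2, 3], 0, 10, 5)

def Spec_findMinimumTimePassed (machines : List Int) (minTime : Int) (maxTime : Int) (goal : Int) (out : Int) : Prop := out = findMinimumTimePassed_alt machines minTime maxTime goal
instance (machines : List Int) (minTime : Int) (maxTime : Int) (goal : Int) (out : Int) : Decidable (Spec_findMinimumTimePassed machines minTime maxTime goal out) := by unfold Spec_findMinimumTimePassed; infer_instance

-- ===== CLAIM (what is proved, stated in full; the proofs are below) =====
def Claim_equal_findMinimumTimePassed : Prop := ∀ (machines : List Int) (minTime : Int) (maxTime : Int) (goal : Int), Dom_findMinimumTimePassed machines minTime maxTime goal → Pre_findMinimumTimePassed machines minTime maxTime goal → Spec_findMinimumTimePassed machines minTime maxTime goal (findMinimumTimePassed machines minTime maxTime goal)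

-- ===== LEMMAS AND PROOFS =====

theorem prodCount_eq_getProductCount (machines : List Int) (t : Int) :
    getProductCountByTimePassed machines t = prodCount machines t := by
  simp [getProductCountByTimePassed, prodCount, PySem.List.foldl_add]

theorem prodCount_mono (machines : List Int) (hpos : ∀ m ∈ machines, 0 < m)
    {t t' : Int} (h : t ≤ t') : prodCount machines t ≤ prodCount machines t' := by
  induction machines with
  | nil => simp [prodCount]
  | cons m ms ih =>
    have hm : 0 < m := hpos m (by simp)
    have hrest := ih (fun x hx => hpos x (List.mem_cons_of_mem m hx))
    have hd : PySem.Int.floordiv t m ≤ PySem.Int.floordiv t' m := by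
      rw [PySem.Int.floordiv_eq_ediv_of_pos hm, PySem.Int.floordiv_eq_ediv_of_pos hm]
      exact Int.ediv_le_ediv hm h
    simp only [prodCount, List.map_cons, List.sum_cons] at *
    omega

-- the characterisation both loops satisfy: result r of searching [lo, hi)
def GoodResult (machines : List Int) (goal lo hi r : Int) : Prop :=
  lo ≤ r ∧ r ≤ hi ∧ (∀ t, lo ≤ t → t < r → prodCount machines t < goal) ∧
    (r < hi → goal ≤ prodCount machines r)

theorem goodResult_unique {machines : List Int} {goal lo hi r r' : Int}
    (h1 : GoodResult machines goal lo hi r) (h2 : GoodResult machines goal lo hi r') : r = r' := by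
  obtain ⟨a1, b1, c1, d1⟩ := h1
  obtain ⟨a2, b2, c2, d2⟩ := h2
  rcases lt_trichotomy r r' with h | h | h
  · have := c2 r a1 h
    have := d1 (by omega)
    omega
  · exact h
  · have := c1 r' a2 h
    have := d2 (by omega)
    omega

theorem initStep_spec (span : Int) :
    ∀ n : Nat, ∀ step : Int, (span - step).toNat = n → (∃ j : Nat, step = 2 ^ j) →
      step ≤ span → ∃ k : Nat, initStep span step = 2 ^ k ∧ (2:Int) ^ k ≤ span ∧ span < 2 * 2 ^ k := by
  intro n
  induction n using Nat.strong_induction_on with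
  | _ n ih =>
    intro step hn hj hle
    obtain ⟨j, hj⟩ := hj
    have hstep : 0 < step := by rw [hj]; positivity
    rw [initStep]
    by_cases hc : step * 2 ≤ span
    · rw [dif_pos ⟨hstep, hc⟩]
      exact ih (span - step * 2).toNat (by omega) (step * 2) rfl
        ⟨j + 1, by rw [hj, pow_succ]⟩ (by omega)
    · rw [dif_neg (by tauto)]
      exact ⟨j, hj, by omega, by omega⟩

theorem bitLoop_good (machines : List Int) (goal lo hi : Int) (hpos : ∀ m ∈ machines, 0 < m) :
    ∀ k : Nat, ∀ t : Int, lo ≤ t → t ≤ hi →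
      (∀ x, lo ≤ x → x < t → prodCount machines x < goal) →
      (∀ x, t + 2 * 2 ^ k - 1 ≤ x → x < hi → goal ≤ prodCount machines x) →
      GoodResult machines goal lo hi (bitLoop machines goal hi t (2 ^ k)) := by
  intro k
  induction k with
  | zero =>
    intro t hlo hhi hpre hK
    rw [bitLoop, dif_pos (by norm_num : (0:Int) < 2 ^ 0)]
    have h2 : PySem.Int.floordiv ((2:Int) ^ 0) 2 = 0 := by decide
    rw [h2, bitLoop, dif_neg (by norm_num)]
    simp only [pow_zero] at hK ⊢
    by_cases hc : t + 1 ≤ hi ∧ prodCount machines (t + 1 - 1) < goal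
    · rw [if_pos hc]
      have hct : prodCount machines t < goal := by
        have := hc.2; simpa using this
      refine ⟨by omega, hc.1, fun x h1 h2 => ?_, fun h => hK _ (by omega) h⟩
      by_cases hx : x = t
      · subst hx; exact hct
      · exact hpre x h1 (by omega)
    · rw [if_neg hc]
      refine ⟨hlo, hhi, hpre, fun h => ?_⟩
      rcases not_and_or.mp hc with h1 | h1
      · omega
      · have : goal ≤ prodCount machines (t + 1 - 1) := by omega
        simpa using this
  | succ k ihk =>
    intro t hlo hhi hpre hK
    have hsp : (0:Int) < 2 ^ (k + 1) := by positivity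
    rw [bitLoop, dif_pos hsp]
    have h2 : PySem.Int.floordiv ((2:Int) ^ (k + 1)) 2 = 2 ^ k := by
      rw [PySem.Int.floordiv_eq_ediv_of_pos (by norm_num), pow_succ]
      exact Int.mul_ediv_cancel _ (by norm_num)
    rw [h2]
    by_cases hc : t + 2 ^ (k + 1) ≤ hi ∧ prodCount machines (t + 2 ^ (k + 1) - 1) < goal
    · rw [if_pos hc]
      refine ihk (t + 2 ^ (k + 1)) (by omega) hc.1 (fun x h1 h2 => ?_)
        (fun x h1 h2 => hK x (by rw [pow_succ] at *; omega) h2)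
      by_cases hx : x < t
      · exact hpre x h1 hx
      · calc prodCount machines x ≤ prodCount machines (t + 2 ^ (k + 1) - 1) :=
              prodCount_mono machines hpos (by omega)
          _ < goal := hc.2
    · rw [if_neg hc]
      refine ihk t hlo hhi hpre (fun x h1 h2 => ?_)
      rcases not_and_or.mp hc with h1' | h1'
      · exfalso; rw [pow_succ] at *; omega
      · have : goal ≤ prodCount machines (t + 2 ^ (k + 1) - 1) := by omega
        calc goal ≤ prodCount machines (t + 2 ^ (k + 1) - 1) := this
          _ ≤ prodCount machines x := prodCount_mono machines hpos (by rw [pow_succ] at *; omega)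

theorem bsearchLoop_good (machines : List Int) (goal : Int) (hpos : ∀ m ∈ machines, 0 < m) :
    ∀ n : Nat, ∀ lo hi : Int, (hi - lo).toNat = n → lo ≤ hi →
      GoodResult machines goal lo hi (bsearchLoop machines goal lo hi) := by
  intro n
  induction n using Nat.strong_induction_on with
  | _ n ih =>
    intro lo hi hn hle
    rw [bsearchLoop]
    by_cases hlt : lo < hi
    · rw [dif_pos hlt]
      have hmid := PySem.Int.floordiv_two_mid_bounds hle (lo := lo) (hi := hi)
      have hmidlt : PySem.Int.floordiv (lo + hi) 2 < hi :=
        (PySem.Int.floordiv_lt_iff_lt_mul (by norm_num)).mpr (by omega)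
      set mid := PySem.Int.floordiv (lo + hi) 2 with hmiddef
      by_cases hc : getProductCountByTimePassed machines mid < goal
      · simp only [if_pos hc]
        have hrec := ih (hi - (mid + 1)).toNat (by omega) (mid + 1) hi rfl (by omega)
        obtain ⟨a, b, c, d⟩ := hrec
        refine ⟨by omega, b, fun t h1 h2 => ?_, d⟩
        by_cases ht : t ≤ mid
        · have hmono := prodCount_mono machines hpos ht
          rw [prodCount_eq_getProductCount] at hc
          omega
        · exact c t (by omega) h2
      · simp only [if_neg hc]
        have hrec := ih (mid - lo).toNat (by omega) lo mid rfl (by omega)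
        obtain ⟨a, b, c, d⟩ := hrec
        refine ⟨a, by omega, c, fun hr => ?_⟩
        by_cases hr2 : bsearchLoop machines goal lo mid < mid
        · exact d hr2
        · have : bsearchLoop machines goal lo mid = mid := by omega
          rw [this]
          rw [prodCount_eq_getProductCount] at hc
          omega
    · rw [dif_neg hlt]
      have : hi = lo := by omega
      subst this
      exact ⟨le_refl _, le_refl _, fun t h1 h2 => by omega, fun h => by omega⟩

-- ===== VERDICT (by name: the statement is the Claim_ definition above) =====
theorem findMinimumTimePassed_spec : Claim_equal_findMinimumTimePassed := by
  intro machines minTime maxTime goal _hdom hpre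
  unfold Spec_findMinimumTimePassed findMinimumTimePassed findMinimumTimePassed_alt
  by_cases hle : maxTime ≤ minTime
  · rw [if_pos hle, bsearchLoop, dif_neg (by omega)]
  · rw [if_neg hle]
    have hlt : minTime < maxTime := by omega
    have hpos : ∀ m ∈ machines, 0 < m := by
      rcases hpre with h | h
      · omega
      · exact h
    obtain ⟨k, hk, hk1, hk2⟩ := initStep_spec (maxTime - minTime)
      (maxTime - minTime - 1).toNat 1 (by omega) ⟨0, by norm_num⟩ (by omega)
    rw [hk]
    exact goodResult_unique
      (bsearchLoop_good machines goal hpos (maxTime - minTime).toNat minTime maxTime rfl (le_of_lt hlt))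
      (bitLoop_good machines goal minTime maxTime hpos k minTime (le_refl _) (le_of_lt hlt)
        (fun x h1 h2 => by omega) (fun x h1 h2 => by omega))
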